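-- pv_equiv track=rewrite | github.com/mehmetalperen/web-crawler | scraper.py | getFP
-- ===== SOURCE A (Python) =====
-- def threeGramHashNumber(three_gram):
--     hashValue = 0
--     for string in three_gram:
--         for character in string:
--             hashValue += ord(character)*31
--     return hashValue % 999
--
-- def getFP(tokens):
--     allHashValues = []
--     mod4HashValues = []
--     grams = get_3grams(tokens)
--
--     for item in grams:
--         hashNumber = threeGramHashNumber(item)
--         #only use some of the hashes (hashes with 0%4) to save memory
--         if hashNumber % 7 == 0:
--             mod4HashValues.append(hashNumber)
--
--         allHashValues.append(hashNumber)
--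
--     if len(mod4HashValues) == 0:
--         return allHashValues
--     else:
--         return mod4HashValues
--
-- def get_3grams(tokens):
--     if len(tokens) == 1:
--         tokens.append("2ndwordbufferjust")
--     if len(tokens) == 2:
--         tokens.append("3rdwordbuffer")
--     ngrams = []
--         # create 3-grams using a sliding window of size 3
--     returnGrams =[]
--     for i in range(len(tokens) - 2):
--         ngrams.append(tokens[i])
--         ngrams.append(tokens[i+1])
--         ngrams.append(tokens[i+2])
--         returnGrams.append(ngrams)
--         ngrams = []
--     return returnGrams
-- ===== SOURCE B (Python) =====
-- def getFP(tokens):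
--     if len(tokens) == 1:
--         tokens.append("2ndwordbufferjust")
--     if len(tokens) == 2:
--         tokens.append("3rdwordbuffer")
--     hs = [sum(ord(c) * 31 for c in t) for t in tokens]
--     all_h = [(hs[i] + hs[i + 1] + hs[i + 2]) % 999 for i in range(len(tokens) - 2)]
--     kept = [h for h in all_h if h % 7 == 0]
--     return kept if kept else all_h
-- ===== Notes on version B (the rewrite author's own statement) =====
-- stated objective: faster
-- what changed: B drops the intermediate list-of-3-gram-lists and the per-gram rehash: it computes each token's character hash once into a table, then one index pass combines three table entries per window, filtering in the same pass.
import Mathlib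
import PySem

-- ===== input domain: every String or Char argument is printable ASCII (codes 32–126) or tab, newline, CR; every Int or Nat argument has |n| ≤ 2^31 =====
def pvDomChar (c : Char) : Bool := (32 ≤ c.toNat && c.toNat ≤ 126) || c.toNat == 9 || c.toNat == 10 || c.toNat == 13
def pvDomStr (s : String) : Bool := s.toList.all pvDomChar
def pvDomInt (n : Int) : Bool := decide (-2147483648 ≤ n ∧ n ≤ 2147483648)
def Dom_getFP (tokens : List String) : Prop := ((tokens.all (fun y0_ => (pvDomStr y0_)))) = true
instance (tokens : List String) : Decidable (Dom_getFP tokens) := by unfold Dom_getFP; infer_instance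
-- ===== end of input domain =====

-- B hashes each character once into a per-token table and combines three table entries per
-- window, instead of rebuilding 3-gram lists and rehashing every character per gram
-- (constant-factor objective). Both A and B mutate the Python `tokens` argument identically
-- (buffer-word appends); the equivalence proved here is about the return value.

-- ===== PORT A =====
def threeGramHashNumber (g : List String) : Int :=
  PySem.Int.mod
    (g.foldl (fun hv s => s.toList.foldl (fun hv c => hv + (c.toNat : Int) * 31) hv) 0) 999

def get_3grams (tokens : List String) : List (List String) :=
  let t1 := if tokens.length = 1 then tokens ++ ["2ndwordbufferjust"] else tokens
  let t := if t1.length = 2 then t1 ++ ["3rdwordbuffer"] else t1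
  (PySem.List.pyRange 0 ((t.length : Int) - 2) 1).foldl
    (fun acc i =>
      acc ++ [[PySem.List.pyGetD t i "", PySem.List.pyGetD t (i + 1) "",
               PySem.List.pyGetD t (i + 2) ""]]) []

def getFP (tokens : List String) : List Int :=
  let grams := get_3grams tokens
  let p := grams.foldl
    (fun (p : List Int × List Int) item =>
      let hashNumber := threeGramHashNumber item
      ((if PySem.Int.mod hashNumber 7 == 0 then p.1 ++ [hashNumber] else p.1),
       p.2 ++ [hashNumber]))
    ([], [])
  if p.1.length = 0 then p.2 else p.1

-- ===== PORT B =====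
def getFP_alt (tokens : List String) : List Int :=
  let t1 := if tokens.length = 1 then tokens ++ ["2ndwordbufferjust"] else tokens
  let t := if t1.length = 2 then t1 ++ ["3rdwordbuffer"] else t1
  let hs := t.map (fun s => (s.toList.map (fun c => (c.toNat : Int) * 31)).sum)
  let allH := (PySem.List.pyRange 0 ((t.length : Int) - 2) 1).map
    (fun i => PySem.Int.mod
      (PySem.List.pyGetD hs i 0 + PySem.List.pyGetD hs (i + 1) 0 +
       PySem.List.pyGetD hs (i + 2) 0) 999)
  let kept := allH.filter (fun h => PySem.Int.mod h 7 == 0)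
  if kept = [] then allH else kept

-- ===== PRECONDITION & SPEC =====
def Spec_getFP (tokens : List String) (out : List Int) : Prop := out = getFP_alt tokens
instance (tokens : List String) (out : List Int) : Decidable (Spec_getFP tokens out) := by unfold Spec_getFP; infer_instance

-- ===== CLAIM (what is proved, stated in full; the proofs are below) =====
def Claim_equal_getFP : Prop := ∀ (tokens : List String), Dom_getFP tokens → Spec_getFP tokens (getFP tokens)

-- ===== LEMMAS AND PROOFS =====

-- A's accumulator loop over the grams builds (filtered hashes, all hashes).
theorem getFP_fold_pair (grams : List (List String)) (a b : List Int) :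
    grams.foldl
      (fun (p : List Int × List Int) item =>
        let hashNumber := threeGramHashNumber item
        ((if PySem.Int.mod hashNumber 7 == 0 then p.1 ++ [hashNumber] else p.1),
         p.2 ++ [hashNumber])) (a, b)
    = (a ++ (grams.map threeGramHashNumber).filter
              (fun h => PySem.Int.mod h 7 == 0),
       b ++ grams.map threeGramHashNumber) := by
  induction grams generalizing a b with
  | nil => simp
  | cons g gs ih =>
    simp only [List.foldl_cons]
    by_cases h : PySem.Int.mod (threeGramHashNumber g) 7 == 0
    · rw [if_pos h, ih, List.map_cons, List.filter_cons]
      have h' : (7 : Int) ∣ threeGramHashNumber g := by simpa using h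
      simp [h', List.append_assoc]
    · rw [if_neg h, ih, List.map_cons, List.filter_cons]
      have h' : ¬ (7 : Int) ∣ threeGramHashNumber g := by simpa using h
      simp [h', List.append_assoc]

-- character-hash fold from an arbitrary start
theorem charFold_eq (s : String) (a : Int) :
    s.toList.foldl (fun hv c => hv + (c.toNat : Int) * 31) a
      = a + (s.toList.map (fun c => (c.toNat : Int) * 31)).sum := by
  exact PySem.List.foldl_add s.toList (fun c => (c.toNat : Int) * 31) a

theorem if_len_eq_nil (L K : List Int) :
    (if K.length = 0 then L else K) = (if K = [] then L else K) := by
  by_cases h : K = []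
  · simp [h]
  · rw [if_neg h, if_neg (by simpa [List.length_eq_zero_iff] using h)]

theorem getFP_spec_aux : ∀ (tokens : List String), getFP tokens = getFP_alt tokens := by
  intro tokens
  unfold getFP getFP_alt get_3grams
  simp only []
  set t1 := if tokens.length = 1 then tokens ++ ["2ndwordbufferjust"] else tokens with ht1
  set t := if t1.length = 2 then t1 ++ ["3rdwordbuffer"] else t1 with ht
  rw [PySem.List.foldl_append_singleton_eq_map, getFP_fold_pair]
  simp only [List.nil_append, List.map_map]
  have hmap : ((PySem.List.pyRange 0 ((t.length : Int) - 2) 1).map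
      (threeGramHashNumber ∘ fun i =>
        [PySem.List.pyGetD t i "", PySem.List.pyGetD t (i + 1) "",
         PySem.List.pyGetD t (i + 2) ""]))
    = (PySem.List.pyRange 0 ((t.length : Int) - 2) 1).map
        (fun i => PySem.Int.mod
          (PySem.List.pyGetD (t.map (fun s => (s.toList.map (fun c => (c.toNat : Int) * 31)).sum)) i 0 +
           PySem.List.pyGetD (t.map (fun s => (s.toList.map (fun c => (c.toNat : Int) * 31)).sum)) (i + 1) 0 +
           PySem.List.pyGetD (t.map (fun s => (s.toList.map (fun c => (c.toNat : Int) * 31)).sum)) (i + 2) 0) 999) := by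
    apply List.map_congr_left
    intro i _
    have hz : ((fun s : String => (s.toList.map (fun c => (c.toNat : Int) * 31)).sum) "") = (0 : Int) := rfl
    simp only [Function.comp_apply, threeGramHashNumber, List.foldl_cons, List.foldl_nil]
    rw [charFold_eq, charFold_eq, charFold_eq, ← hz, PySem.List.pyGetD_map,
      PySem.List.pyGetD_map, PySem.List.pyGetD_map, hz, zero_add]
  rw [hmap]
  exact if_len_eq_nil _ _

-- ===== VERDICT (by name: the statement is the Claim_ definition above) =====
theorem getFP_spec : Claim_equal_getFP := by
  intro tokens _
  unfold Spec_getFP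
  exact getFP_spec_aux tokens
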